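-- pv_equiv track=rewrite | github.com/Henkdetenk12345/HBN-TEKSTI | weather.py | split_area_name
-- ===== SOURCE A (Python) =====
-- def split_area_name(area):
--     """Split lange area namen slim over meerdere regels"""
--     if len(area) <= 40:
--         return [area]
--
--     parts = [p.strip() for p in area.split(',')]
--     lines = []
--     current = ""
--
--     for i, part in enumerate(parts):
--         if i == 0:
--             current = part
--         else:
--             test = current + ", " + part
--             if len(test) <= 40:
--                 current = test
--             else:
--                 lines.append(current + ",")
--                 current = part
--
--     if current:
--         lines.append(current)
--
--     return lines
-- ===== SOURCE B (Python) =====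
-- def split_area_name(area):
--     """Split lange area namen slim over meerdere regels"""
--     if len(area) <= 40:
--         return [area]
--     parts = [p.strip() for p in area.split(',')]
--     # prefix sums of the stripped part lengths: pre[k] = len(parts[0]) + ... + len(parts[k-1])
--     pre = [0]
--     for p in parts:
--         pre.append(pre[-1] + len(p))
--     n = len(parts)
--     lines = []
--     i = 0
--     while i < n:
--         # extend the line while the joined length, computed arithmetically, still fits
--         j = i + 1
--         while j < n and pre[j + 1] - pre[i] + 2 * (j - i) <= 40:
--             j += 1
--         chunk = ", ".join(parts[i:j])
--         if j < n:
--             lines.append(chunk + ",")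
--         elif chunk:
--             lines.append(chunk)
--         i = j
--     return lines
-- ===== Notes on version B (the rewrite author's own statement) =====
-- stated objective: alternative
-- what changed: B replaces A's string-accumulating fold with an index-arithmetic algorithm: it precomputes prefix sums of the stripped part lengths, finds each line break purely by integer comparisons on those sums (no string is built while deciding), and only then materialises each line by slicing and joining the parts.
import Mathlib
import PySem

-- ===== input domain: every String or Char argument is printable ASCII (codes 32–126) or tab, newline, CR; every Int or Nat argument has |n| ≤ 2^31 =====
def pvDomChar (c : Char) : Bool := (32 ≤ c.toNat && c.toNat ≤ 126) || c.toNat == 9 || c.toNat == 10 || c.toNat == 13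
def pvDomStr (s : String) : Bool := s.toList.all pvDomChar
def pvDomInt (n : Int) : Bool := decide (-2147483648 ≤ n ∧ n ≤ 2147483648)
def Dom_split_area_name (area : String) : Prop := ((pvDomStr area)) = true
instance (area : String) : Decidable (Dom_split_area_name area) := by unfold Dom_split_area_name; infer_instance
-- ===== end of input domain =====

-- B replaces A's string-accumulating fold by index arithmetic: prefix sums of the
-- part lengths decide every line break by integer comparison, and each line is
-- then materialised by slicing + joining (objective: alternative, same O(n) cost).


-- ===== PORT A =====
-- A's enumerate loop, the counter i of enumerate kept as the first state component.
def pvAStep (st : Nat × List String × String) (part : String) :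
    Nat × List String × String :=
  let (i, lines, current) := st
  if i = 0 then (i + 1, lines, part)
  else
    let test := current ++ ", " ++ part
    if PySem.Str.len test ≤ 40 then (i + 1, lines, test)
    else (i + 1, lines ++ [current ++ ","], part)

def split_area_name (area : String) : List String :=
  if PySem.Str.len area ≤ 40 then [area]
  else
    let parts := ((PySem.Str.split? area ",").getD []).map PySem.Str.strip
    let st := parts.foldl pvAStep (0, [], "")
    if st.2.2 ≠ "" then st.2.1 ++ [st.2.2] else st.2.1

-- ===== PORT B =====
-- Source B: pre = [0]; for p in parts: pre.append(pre[-1] + len(p))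
-- (pre[-1] is exact via pyGetD: the accumulator is never empty)
def pvBuildPre (parts : List String) : List Int :=
  parts.foldl (fun pre p => pre ++ [PySem.List.pyGetD pre (-1) 0 + PySem.Str.len p]) [0]

-- Source B inner while: advance j while it fits (pre[j+1], pre[i] are in range whenever
-- the loop runs, as in the Python; pyGetD is the exact total form of that access).
-- fuel = n - j bounds the remaining iterations; it only makes the while loop total.
def pvAdvance (pre : List Int) (n i : Int) : Nat → Int → Int
  | 0, j => j
  | fuel + 1, j =>
    if j < n ∧ PySem.List.pyGetD pre (j + 1) 0 - PySem.List.pyGetD pre i 0 + 2 * (j - i) ≤ 40 then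
      pvAdvance pre n i fuel (j + 1)
    else j

-- Source B outer while: one recursive step per emitted line (fuel = n bounds the
-- number of lines; it only makes the while loop total)
def pvOuter (parts : List String) (pre : List Int) (n : Int) : Nat → Int → List String
  | 0, _ => []
  | fuel + 1, i =>
    if i < n then
      let j := pvAdvance pre n i (n - (i + 1)).toNat (i + 1)
      let chunk := PySem.Str.join ", " (PySem.List.slice parts (some i) (some j))
      if j < n then (chunk ++ ",") :: pvOuter parts pre n fuel j
      else if chunk ≠ "" then [chunk] else []
    else []

def split_area_name_alt (area : String) : List String :=
  if PySem.Str.len area ≤ 40 then [area]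
  else
    let parts := ((PySem.Str.split? area ",").getD []).map PySem.Str.strip
    let pre := pvBuildPre parts
    pvOuter parts pre (parts.length : Int) (parts.length + 1) 0

-- ===== PRECONDITION & SPEC =====
def Spec_split_area_name (area : String) (out : List String) : Prop := out = split_area_name_alt area
instance (area : String) (out : List String) : Decidable (Spec_split_area_name area out) := by unfold Spec_split_area_name; infer_instance

-- ===== CLAIM (what is proved, stated in full; the proofs are below) =====
def Claim_equal_split_area_name : Prop := ∀ (area : String), Dom_split_area_name area → Spec_split_area_name area (split_area_name area)

-- ===== LEMMAS AND PROOFS =====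

-- common greedy reference shape both ports are reduced to
def pvLinesFrom : String → List String → List String
  | cur, [] => if cur ≠ "" then [cur] else []
  | cur, q :: qs =>
    if PySem.Str.len (cur ++ ", " ++ q) ≤ 40 then pvLinesFrom (cur ++ ", " ++ q) qs
    else (cur ++ ",") :: pvLinesFrom q qs

-- ---- A-side: the fold equals pvLinesFrom ----
lemma pv_A_loop (ps : List String) : ∀ (i : Nat), i ≠ 0 → ∀ (lines : List String) (cur : String),
    (let st := ps.foldl pvAStep (i, lines, cur)
     if st.2.2 ≠ "" then st.2.1 ++ [st.2.2] else st.2.1)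
    = lines ++ pvLinesFrom cur ps := by
  induction ps with
  | nil =>
    intro i hi lines cur
    simp only [List.foldl_nil, pvLinesFrom]
    split <;> simp_all
  | cons p ps ih =>
    intro i hi lines cur
    simp only [List.foldl_cons, pvLinesFrom]
    by_cases hc : PySem.Str.len (cur ++ ", " ++ p) ≤ 40
    · rw [show pvAStep (i, lines, cur) p = (i + 1, lines, cur ++ ", " ++ p) from by
        simp only [pvAStep]; rw [if_neg hi, if_pos hc]]
      rw [ih (i + 1) (by omega) lines (cur ++ ", " ++ p), if_pos hc]
    · rw [show pvAStep (i, lines, cur) p = (i + 1, lines ++ [cur ++ ","], p) from by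
        simp only [pvAStep]; rw [if_neg hi, if_neg hc]]
      rw [ih (i + 1) (by omega) (lines ++ [cur ++ ","]) p, if_neg hc]
      simp

-- ---- string facts (join length / snoc / singleton) ----
lemma pv_chars_join_snoc (sep : List Char) (l : List (List Char)) (p : List Char)
    (h : l ≠ []) :
    PySem.Chars.join sep (l ++ [p]) = PySem.Chars.join sep l ++ sep ++ p := by
  induction l with
  | nil => simp at h
  | cons a as ih =>
    cases as with
    | nil => simp [PySem.Chars.join_cons_cons, PySem.Chars.join_singleton]
    | cons b bs =>
      have hih := ih (by simp)
      simp only [List.cons_append] at hih ⊢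
      rw [PySem.Chars.join_cons_cons, PySem.Chars.join_cons_cons, hih]
      simp [List.append_assoc]

lemma pv_join_snoc (g : List String) (p : String) (h : g ≠ []) :
    PySem.Str.join ", " (g ++ [p]) = PySem.Str.join ", " g ++ ", " ++ p := by
  rw [← String.toList_inj]
  simp only [PySem.Str.toList_join, List.map_append, List.map_cons,
    List.map_nil, String.toList_append]
  rw [pv_chars_join_snoc _ _ _ (by simpa using h)]

lemma pv_join_singleton (p : String) : PySem.Str.join ", " [p] = p := by
  rw [← String.toList_inj]
  simp [PySem.Str.toList_join, PySem.Chars.join_singleton]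

lemma pv_join_len (xs : List String) (h : xs ≠ []) :
    PySem.Str.len (PySem.Str.join ", " xs)
      = (xs.map PySem.Str.len).sum + 2 * ((xs.length : Int) - 1) := by
  induction xs with
  | nil => simp at h
  | cons a as ih =>
    cases as with
    | nil => simp [pv_join_singleton]
    | cons b bs =>
      rw [show (a :: b :: bs) = [a] ++ (b :: bs) from rfl, show ([a] : List String) ++ (b :: bs) = a :: b :: bs from rfl]
      have : PySem.Str.join ", " (a :: b :: bs) = a ++ ", " ++ PySem.Str.join ", " (b :: bs) := by
        rw [← String.toList_inj]
        simp only [PySem.Str.toList_join, List.map_cons, String.toList_append]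
        rw [PySem.Chars.join_cons_cons]
      rw [this]
      rw [PySem.Str.len_append, PySem.Str.len_append, ih (by simp)]
      simp only [List.map_cons, List.sum_cons, List.length_cons]
      have h2 : PySem.Str.len ", " = 2 := by decide
      push_cast
      rw [h2]; ring

-- ---- prefix-sum facts ----
def pvPS (a : Int) : List String → List Int
  | [] => []
  | p :: ps => (a + PySem.Str.len p) :: pvPS (a + PySem.Str.len p) ps

lemma pv_buildPre_foldl (ls : List String) : ∀ (acc : List Int) (h : acc ≠ []),
    ls.foldl (fun pre p => pre ++ [PySem.List.pyGetD pre (-1) 0 + PySem.Str.len p]) acc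
      = acc ++ pvPS (acc.getLast h) ls := by
  induction ls with
  | nil => intro acc h; simp [pvPS]
  | cons p ps ih =>
    intro acc h
    simp only [List.foldl_cons]
    rw [PySem.List.pyGetD_neg_one acc 0 h]
    rw [ih (acc ++ [acc.getLast h + PySem.Str.len p]) (by simp)]
    simp [pvPS]

lemma pv_buildPre_eq (parts : List String) :
    pvBuildPre parts = 0 :: pvPS 0 parts := by
  unfold pvBuildPre
  rw [pv_buildPre_foldl parts [0] (by simp)]
  simp

lemma pv_ps_getD (k : Nat) : ∀ (ps : List String) (a : Int), k < ps.length →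
    (pvPS a ps).getD k 0 = a + ((ps.take (k + 1)).map PySem.Str.len).sum := by
  induction k with
  | zero =>
    intro ps a hk
    cases ps with
    | nil => simp at hk
    | cons p ps => simp [pvPS]
  | succ k ih =>
    intro ps a hk
    cases ps with
    | nil => simp at hk
    | cons p ps =>
      simp only [pvPS, List.getD_cons_succ, List.take_succ_cons, List.map_cons, List.sum_cons]
      rw [ih ps (a + PySem.Str.len p) (by simpa using hk)]
      ring

lemma pv_pre_getD (parts : List String) (k : Nat) (hk : k ≤ parts.length) :
    PySem.List.pyGetD (pvBuildPre parts) (k : Int) 0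
      = ((parts.take k).map PySem.Str.len).sum := by
  rw [PySem.List.pyGetD_natCast, pv_buildPre_eq]
  cases k with
  | zero => simp
  | succ k => simpa using pv_ps_getD k parts 0 (by omega)

-- ---- slice facts ----
lemma pv_slice_snoc (parts : List String) (i j : Nat) (hij : i ≤ j) (hj : j < parts.length) :
    PySem.List.slice parts (some (i : Int)) (some ((j : Int) + 1))
      = PySem.List.slice parts (some (i : Int)) (some (j : Int)) ++ [parts[j]] := by
  have h1 : ((j : Int) + 1) = ((j + 1 : Nat) : Int) := by push_cast; ring
  rw [h1, PySem.List.slice_natCast, PySem.List.slice_natCast]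
  have h2 : j + 1 - i = (j - i) + 1 := by omega
  rw [h2, List.take_add_one]
  congr 1
  rw [List.getElem?_drop]
  have : i + (j - i) = j := by omega
  rw [this, List.getElem?_eq_getElem hj]
  rfl

lemma pv_slice_singleton (parts : List String) (i : Nat) (hi : i < parts.length) :
    PySem.List.slice parts (some (i : Int)) (some ((i : Int) + 1)) = [parts[i]] := by
  have h1 : ((i : Int) + 1) = ((i + 1 : Nat) : Int) := by push_cast; ring
  rw [h1, PySem.List.slice_natCast]
  have h2 : i + 1 - i = 1 := by omega
  rw [h2, List.drop_eq_getElem_cons hi]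
  rfl

lemma pv_slice_sum (parts : List String) (i j : Nat) (hij : i ≤ j) (_hj : j ≤ parts.length) :
    ((PySem.List.slice parts (some (i : Int)) (some (j : Int))).map PySem.Str.len).sum
      = ((parts.take j).map PySem.Str.len).sum - ((parts.take i).map PySem.Str.len).sum := by
  rw [PySem.List.slice_natCast]
  have : parts.take j = parts.take i ++ (parts.drop i).take (j - i) := by
    rw [← List.take_add]
    congr 1; omega
  rw [this]
  simp

lemma pv_slice_len (parts : List String) (i j : Nat) (_hij : i ≤ j) (hj : j ≤ parts.length) :
    (PySem.List.slice parts (some (i : Int)) (some (j : Int))).length = j - i := by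
  rw [PySem.List.slice_natCast]
  simp
  omega

-- the fit test on prefix sums equals A's fit test on the joined string
lemma pv_fit_iff (parts : List String) (i j : Nat) (hij : i < j) (hj : j < parts.length) :
    (PySem.List.pyGetD (pvBuildPre parts) ((j : Int) + 1) 0
       - PySem.List.pyGetD (pvBuildPre parts) (i : Int) 0 + 2 * ((j : Int) - (i : Int)) ≤ 40)
    ↔ PySem.Str.len (PySem.Str.join ", " (PySem.List.slice parts (some (i : Int)) (some (j : Int)))
        ++ ", " ++ parts[j]) ≤ 40 := by
  have h1 : ((j : Int) + 1) = ((j + 1 : Nat) : Int) := by push_cast; ring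
  rw [h1, pv_pre_getD parts (j + 1) (by omega), pv_pre_getD parts i (by omega)]
  have hne : PySem.List.slice parts (some (i : Int)) (some (j : Int)) ≠ [] := by
    intro hcon
    have := pv_slice_len parts i j (by omega) (by omega)
    rw [hcon] at this; simp at this; omega
  rw [PySem.Str.len_append, PySem.Str.len_append, pv_join_len _ hne,
    pv_slice_sum parts i j (by omega) (by omega), pv_slice_len parts i j (by omega) (by omega)]
  have htake : parts.take (j + 1) = parts.take j ++ [parts[j]] := List.take_add_one ▸ by
    rw [List.getElem?_eq_getElem hj]; rfl
  rw [htake]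
  have h2 : PySem.Str.len ", " = 2 := by decide
  rw [h2]
  simp only [List.map_append, List.sum_append, List.map_cons, List.map_nil, List.sum_cons,
    List.sum_nil]
  omega

-- ---- B-side main induction ----
lemma pv_B_loop (parts : List String) : ∀ (m i j fuel : Nat), i < j → j ≤ parts.length →
    parts.length - j = m → m ≤ fuel →
    (if pvAdvance (pvBuildPre parts) (parts.length : Int) (i : Int)
          ((parts.length : Int) - (j : Int)).toNat (j : Int) < (parts.length : Int) then
       (PySem.Str.join ", " (PySem.List.slice parts (some (i : Int))
           (some (pvAdvance (pvBuildPre parts) (parts.length : Int) (i : Int)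
             ((parts.length : Int) - (j : Int)).toNat (j : Int)))) ++ ",")
         :: pvOuter parts (pvBuildPre parts) (parts.length : Int) fuel
              (pvAdvance (pvBuildPre parts) (parts.length : Int) (i : Int)
                ((parts.length : Int) - (j : Int)).toNat (j : Int))
     else if PySem.Str.join ", " (PySem.List.slice parts (some (i : Int))
           (some (pvAdvance (pvBuildPre parts) (parts.length : Int) (i : Int)
             ((parts.length : Int) - (j : Int)).toNat (j : Int)))) ≠ "" then
       [PySem.Str.join ", " (PySem.List.slice parts (some (i : Int))
           (some (pvAdvance (pvBuildPre parts) (parts.length : Int) (i : Int)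
             ((parts.length : Int) - (j : Int)).toNat (j : Int))))]
     else [])
    = pvLinesFrom (PySem.Str.join ", " (PySem.List.slice parts (some (i : Int)) (some (j : Int))))
        (parts.drop j) := by
  intro m
  induction m using Nat.strong_induction_on with
  | _ m ihm =>
    intro i j fuel hij hj hm hfuel
    by_cases hjn : (j : Int) < (parts.length : Int)
    · have hjn' : j < parts.length := by exact_mod_cast hjn
      have hdrop : parts.drop j = parts[j] :: parts.drop (j + 1) := List.drop_eq_getElem_cons hjn'
      have hsucc : ((parts.length : Int) - (j : Int)).toNat
          = ((parts.length : Int) - ((j : Int) + 1)).toNat + 1 := by omega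
      have hcast : ((j : Int) + 1) = ((j + 1 : Nat) : Int) := by push_cast; ring
      by_cases hfit : PySem.List.pyGetD (pvBuildPre parts) ((j : Int) + 1) 0
          - PySem.List.pyGetD (pvBuildPre parts) (i : Int) 0 + 2 * ((j : Int) - (i : Int)) ≤ 40
      · -- the inner while advances: j ↦ j+1
        rw [hsucc]
        simp only [pvAdvance]
        have hcond : ((j : Int) < (parts.length : Int) ∧
            PySem.List.pyGetD (pvBuildPre parts) ((j : Int) + 1) 0
              - PySem.List.pyGetD (pvBuildPre parts) (i : Int) 0
              + 2 * ((j : Int) - (i : Int)) ≤ 40) := ⟨hjn, hfit⟩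
        rw [if_pos hcond]
        simp only [hcast]
        rw [ihm (m - 1) (by omega) i (j + 1) fuel (by omega) (by omega) (by omega) (by omega)]
        rw [hdrop]
        simp only [pvLinesFrom]
        rw [if_pos ((pv_fit_iff parts i j hij hjn').mp hfit)]
        congr 1
        rw [← pv_join_snoc _ _ (by
          intro hcon
          have := pv_slice_len parts i j (by omega) (by omega)
          rw [hcon] at this; simp at this; omega)]
        rw [← pv_slice_snoc parts i j (by omega) hjn', hcast]
      · -- the inner while stops at j; a line is emitted and the outer loop continues at j
        rw [hsucc]
        simp only [pvAdvance]
        have hcond : ¬ ((j : Int) < (parts.length : Int) ∧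
            PySem.List.pyGetD (pvBuildPre parts) ((j : Int) + 1) 0
              - PySem.List.pyGetD (pvBuildPre parts) (i : Int) 0
              + 2 * ((j : Int) - (i : Int)) ≤ 40) := fun hcon => hfit hcon.2
        rw [if_neg hcond]
        rw [if_pos hjn]
        rw [hdrop]
        simp only [pvLinesFrom]
        rw [if_neg ((fun hc => hfit ((pv_fit_iff parts i j hij hjn').mpr hc)))]
        congr 1
        -- unfold pvOuter one step at j
        obtain ⟨f, rfl⟩ : ∃ f, fuel = f + 1 := ⟨fuel - 1, by omega⟩
        simp only [pvOuter]
        rw [if_pos hjn]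
        simp only [hcast]
        rw [ihm (m - 1) (by omega) j (j + 1) f (by omega) (by omega) (by omega) (by omega)]
        rw [show ((j + 1 : Nat) : Int) = ((j : Int) + 1) from by push_cast; ring,
          pv_slice_singleton parts j hjn', pv_join_singleton]
    · -- j = length: last chunk
      have hje : j = parts.length := by omega
      rw [show ((parts.length : Int) - (j : Int)).toNat = 0 from by omega]
      simp only [pvAdvance]
      rw [if_neg hjn]
      rw [hje, List.drop_length]
      simp only [pvLinesFrom]

-- ===== VERDICT (by name: the statement is the Claim_ definition above) =====
theorem split_area_name_spec : Claim_equal_split_area_name := by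
  intro area _
  unfold Spec_split_area_name split_area_name split_area_name_alt
  by_cases h40 : PySem.Str.len area ≤ 40
  · rw [if_pos h40, if_pos h40]
  · rw [if_neg h40, if_neg h40]
    cases hp : ((PySem.Str.split? area ",").getD []).map PySem.Str.strip with
    | nil =>
      simp only [List.foldl_nil]
      simp [pvOuter]
    | cons p0 rest =>
      simp only [List.foldl_cons]
      rw [show pvAStep (0, [], "") p0 = (1, [], p0) from by simp [pvAStep]]
      rw [pv_A_loop rest 1 (by omega) [] p0]
      simp only [pvOuter]
      rw [if_pos (by simp : (0 : Int) < ((p0 :: rest).length : Int))]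
      have hz : (0 : Int) = ((0 : Nat) : Int) := by norm_num
      have h01 : (((0 : Nat) : Int) + 1) = ((1 : Nat) : Int) := by norm_num
      simp only [hz, h01]
      rw [pv_B_loop (p0 :: rest) ((p0 :: rest).length - 1) 0 1 (p0 :: rest).length
        (by omega) (by simp) rfl (by omega)]
      rw [show ((1 : Nat) : Int) = ((0 : Nat) : Int) + 1 from by norm_num,
        pv_slice_singleton (p0 :: rest) 0 (by simp), pv_join_singleton]
      simp
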